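-- pv_equiv track=rewrite | github.com/ylab-hi/ScanNeo2 | workflow/scripts/compile_peptides_from_fusions.py | determine_consequence
-- ===== SOURCE A (Python) =====
-- def determine_consequence(reading_frame, events):
--     csq = ""
--     if reading_frame is not None:
--         if reading_frame == "in-frame":
--             csq = "inframe_"
--         elif reading_frame == "out-of-frame":
--             csq = "frameshift_"
--
--         evts = events.split('/')
--         for evt in evts:
--             if (evt == "read-through" or
--                 evt == "ITD" or
--                 evt == "5'-5'" or
--                 evt == "3'-3'"):
--                 return None
--             elif evt == "translocation":
--                 csq += "trs"
--             elif evt == "duplication":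
--                 csq += "dup"
--             elif evt == "deletion":
--                 csq += "del"
--             elif evt == "inversion":
--                 csq += "inv"
--
--
--         return csq
--     else:
--         return None
-- ===== SOURCE B (Python) =====
-- def _suffix(tokens):
--     # Recursively build the consequence string for `tokens` back-to-front:
--     # compute the suffix for the remaining tokens first, then prepend this
--     # token's abbreviation; None (forbidden token anywhere) propagates up.
--     if not tokens:
--         return ""
--     rest = _suffix(tokens[1:])
--     head = tokens[0]
--     if rest is None or head in ("read-through", "ITD", "5'-5'", "3'-3'"):
--         return None
--     abbr = ("trs" if head == "translocation" else
--             "dup" if head == "duplication" else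
--             "del" if head == "deletion" else
--             "inv" if head == "inversion" else "")
--     return abbr + rest
--
-- def determine_consequence(reading_frame, events):
--     if reading_frame is None:
--         return None
--     suffix = _suffix(events.split('/'))
--     if suffix is None:
--         return None
--     prefix = ("inframe_" if reading_frame == "in-frame" else
--               "frameshift_" if reading_frame == "out-of-frame" else "")
--     return prefix + suffix
-- ===== Notes on version B (the rewrite author's own statement) =====
-- stated objective: alternative
-- what changed: Replaces A's single left-to-right loop that mutates a csq accumulator (prefix first, mid-loop early return) with a recursive helper that consumes the token list and builds the consequence suffix back-to-front (tail computed first, this token's abbreviation prepended, None propagated), the prefix being attached only after the whole suffix exists.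
import Mathlib
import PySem

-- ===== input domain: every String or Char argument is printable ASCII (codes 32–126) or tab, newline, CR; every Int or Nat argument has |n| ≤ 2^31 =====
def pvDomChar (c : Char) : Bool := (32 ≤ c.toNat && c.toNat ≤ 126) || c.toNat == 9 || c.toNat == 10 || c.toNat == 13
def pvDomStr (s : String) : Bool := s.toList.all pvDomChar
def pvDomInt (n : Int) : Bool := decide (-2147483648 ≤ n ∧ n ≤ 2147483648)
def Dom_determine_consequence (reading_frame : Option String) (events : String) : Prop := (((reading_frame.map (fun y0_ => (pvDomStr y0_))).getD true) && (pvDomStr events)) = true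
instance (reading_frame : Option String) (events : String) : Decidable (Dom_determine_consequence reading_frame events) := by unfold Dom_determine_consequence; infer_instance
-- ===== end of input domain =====

-- B: builds the same result recursively back-to-front (suffix for the rest of the tokens first, then this token's abbreviation, prefix attached last); objective: alternative decomposition, same cost.


-- ===== PORT A =====
-- A's for-loop with mid-loop early return, as structural recursion over the split list
def dcLoopA (csq : String) : List String → Option String
  | [] => some csq
  | evt :: rest =>
    if evt = "read-through" ∨ evt = "ITD" ∨ evt = "5'-5'" ∨ evt = "3'-3'" then
      none
    else if evt = "translocation" then dcLoopA (csq ++ "trs") rest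
    else if evt = "duplication" then dcLoopA (csq ++ "dup") rest
    else if evt = "deletion" then dcLoopA (csq ++ "del") rest
    else if evt = "inversion" then dcLoopA (csq ++ "inv") rest
    else dcLoopA csq rest

def determine_consequence (reading_frame : Option String) (events : String) : Option String :=
  match reading_frame with
  | none => none
  | some rf =>
    let csq : String := if rf = "in-frame" then "inframe_"
      else if rf = "out-of-frame" then "frameshift_" else ""
    dcLoopA csq ((PySem.Str.split? events "/").getD [])

-- ===== PORT B =====
-- B's recursive _suffix: suffix for the rest first, then prepend this token's abbreviation
def dcSuffix : List String → Option String
  | [] => some ""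
  | head :: tokens =>
    match dcSuffix tokens with
    | none => none
    | some rest =>
      if head = "read-through" ∨ head = "ITD" ∨ head = "5'-5'" ∨ head = "3'-3'" then none
      else
        let abbr : String := if head = "translocation" then "trs"
          else if head = "duplication" then "dup"
          else if head = "deletion" then "del"
          else if head = "inversion" then "inv" else ""
        some (abbr ++ rest)

def determine_consequence_alt (reading_frame : Option String) (events : String) : Option String :=
  match reading_frame with
  | none => none
  | some rf =>
    match dcSuffix ((PySem.Str.split? events "/").getD []) with
    | none => none
    | some suffix =>
      let prefix_ : String := if rf = "in-frame" then "inframe_"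
        else if rf = "out-of-frame" then "frameshift_" else ""
      some (prefix_ ++ suffix)

-- ===== PRECONDITION & SPEC =====
def Spec_determine_consequence (reading_frame : Option String) (events : String) (out : Option String) : Prop := out = determine_consequence_alt reading_frame events
instance (reading_frame : Option String) (events : String) (out : Option String) : Decidable (Spec_determine_consequence reading_frame events out) := by unfold Spec_determine_consequence; infer_instance

-- ===== CLAIM =====
def Claim_equal_determine_consequence : Prop := ∀ (reading_frame : Option String) (events : String), Dom_determine_consequence reading_frame events → Spec_determine_consequence reading_frame events (determine_consequence reading_frame events)

-- ===== LEMMAS AND PROOFS =====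
-- A's accumulator loop equals B's back-to-front suffix with the accumulator prepended
theorem dcLoopA_eq_suffix (evts : List String) : ∀ (csq : String),
    dcLoopA csq evts = (dcSuffix evts).map (fun suf => csq ++ suf) := by
  induction evts with
  | nil => intro csq; simp [dcLoopA, dcSuffix]
  | cons evt rest ih =>
    intro csq
    by_cases hf : evt = "read-through" ∨ evt = "ITD" ∨ evt = "5'-5'" ∨ evt = "3'-3'"
    · simp only [dcLoopA, dcSuffix, if_pos hf]
      cases dcSuffix rest <;> simp
    · simp only [dcLoopA, dcSuffix, if_neg hf]
      by_cases e1 : evt = "translocation"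
      · simp only [if_pos e1, ih]
        cases dcSuffix rest <;> simp [String.append_assoc]
      · simp only [if_neg e1]
        by_cases e2 : evt = "duplication"
        · simp only [if_pos e2, ih]
          cases dcSuffix rest <;> simp [String.append_assoc]
        · simp only [if_neg e2]
          by_cases e3 : evt = "deletion"
          · simp only [if_pos e3, ih]
            cases dcSuffix rest <;> simp [String.append_assoc]
          · simp only [if_neg e3]
            by_cases e4 : evt = "inversion"
            · simp only [if_pos e4, ih]
              cases dcSuffix rest <;> simp [String.append_assoc]
            · simp only [if_neg e4, ih]
              cases dcSuffix rest <;> simp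

-- ===== VERDICT =====
theorem determine_consequence_spec : Claim_equal_determine_consequence := by
  intro reading_frame events _
  unfold Spec_determine_consequence determine_consequence determine_consequence_alt
  cases reading_frame with
  | none => rfl
  | some rf =>
    simp only [dcLoopA_eq_suffix]
    cases dcSuffix ((PySem.Str.split? events "/").getD []) <;> simp
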